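-- pv_equiv track=rewrite | github.com/Lyhappig/HustThesis | quantum/utils/check_mul.py | qt10
-- ===== SOURCE A (Python) =====
-- from typing import List
--
-- def qt10(x, y, z) -> List[List[int]]:
--     a = [0 for _ in range(4)]
--     b = [0 for _ in range(4)]
--     t = [0 for _ in range(4)]
--     d = [0 for _ in range(15)]
--     for i in range(4):
--         a[i] = x[i]
--         b[i] = y[i]
--         t[i] = z[i]
--
--     def cx(p, q):
--         return p ^ q
--
--     def ccx(p, q, r):
--         return (p & q) ^ r
--
--     t[2] = cx(t[3], t[2])
--     t[0] = cx(t[2], t[0])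
--     t[0] = cx(t[1], t[0])
--     # mul2
--     d[2] = cx(a[1], d[2])
--     d[2] = cx(a[3], d[2])
--     d[3] = cx(b[1], d[3])
--     d[3] = cx(b[3], d[3])
--     d[4] = cx(a[2], d[4])
--     d[4] = cx(a[3], d[4])
--     d[5] = cx(b[2], d[5])
--     d[5] = cx(b[3], d[5])
--     d[6] = cx(a[0], d[6])
--     d[6] = cx(a[2], d[6])
--     d[7] = cx(b[0], d[7])
--     d[7] = cx(b[2], d[7])
--     d[0] = cx(d[6], d[0])
--     d[0] = cx(d[2], d[0])
--     d[1] = cx(d[7], d[1])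
--     d[1] = cx(d[3], d[1])
--     d[8] = cx(a[0], d[8])
--     d[8] = cx(a[1], d[8])
--     d[9] = cx(b[0], d[9])
--     d[9] = cx(b[1], d[9])
--     t[0] = ccx(d[0], d[1], t[0])
--     t[1] = ccx(d[2], d[3], t[1])
--     t[2] = ccx(d[4], d[5], t[2])
--     t[3] = ccx(d[8], d[9], t[3])
--     d[10] = ccx(d[6], d[7], d[10])
--     d[11] = ccx(a[3], b[3], d[11])
--     d[12] = ccx(a[2], b[2], d[12])
--     d[13] = ccx(a[1], b[1], d[13])
--     d[14] = ccx(a[0], b[0], d[14])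
--     t[0] = cx(t[1], t[0])
--     t[0] = cx(t[2], t[0])
--     t[0] = cx(d[11], t[0])
--     t[1] = cx(d[10], t[1])
--     t[1] = cx(d[11], t[1])
--     t[1] = cx(d[12], t[1])
--     t[2] = cx(t[3], t[2])
--     t[2] = cx(d[11], t[2])
--     t[2] = cx(d[14], t[2])
--     t[3] = cx(d[11], t[3])
--     t[3] = cx(d[12], t[3])
--     t[3] = cx(d[13], t[3])
--     d[14] = ccx(a[0], b[0], d[14])
--     d[13] = ccx(a[1], b[1], d[13])
--     d[12] = ccx(a[2], b[2], d[12])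
--     d[11] = ccx(a[3], b[3], d[11])
--     d[10] = ccx(d[6], d[7], d[10])
--     d[9] = cx(b[0], d[9])
--     d[9] = cx(b[1], d[9])
--     d[8] = cx(a[0], d[8])
--     d[8] = cx(a[1], d[8])
--     d[1] = cx(d[7], d[1])
--     d[1] = cx(d[3], d[1])
--     d[0] = cx(d[6], d[0])
--     d[0] = cx(d[2], d[0])
--     d[7] = cx(b[0], d[7])
--     d[7] = cx(b[2], d[7])
--     d[6] = cx(a[0], d[6])
--     d[6] = cx(a[2], d[6])
--     d[5] = cx(b[2], d[5])
--     d[5] = cx(b[3], d[5])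
--     d[4] = cx(a[2], d[4])
--     d[4] = cx(a[3], d[4])
--     d[3] = cx(b[1], d[3])
--     d[3] = cx(b[3], d[3])
--     d[2] = cx(a[1], d[2])
--     d[2] = cx(a[3], d[2])
--
--     return [a, b, d, t]
-- ===== SOURCE B (Python) =====
-- def qt10(x, y, z):
--     # Direct algebraic evaluation of the fixed 4-bit multiplier circuit:
--     # the mirrored second half of the gate list un-computes every ancilla d[k]
--     # back to 0, a and b are plain copies of x and y, and each t[i] collapses
--     # to one closed-form XOR of AND terms.
--     a = [x[i] for i in range(4)]
--     b = [y[i] for i in range(4)]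
--     zz = [z[i] for i in range(4)]
--     d = [0] * 15
--     ea = a[0] ^ a[1] ^ a[2] ^ a[3]
--     eb = b[0] ^ b[1] ^ b[2] ^ b[3]
--     t = [
--         zz[0] ^ (ea & eb) ^ ((a[1] ^ a[3]) & (b[1] ^ b[3])) ^ ((a[2] ^ a[3]) & (b[2] ^ b[3])) ^ (a[3] & b[3]),
--         zz[1] ^ ((a[1] ^ a[3]) & (b[1] ^ b[3])) ^ ((a[0] ^ a[2]) & (b[0] ^ b[2])) ^ (a[3] & b[3]) ^ (a[2] & b[2]),
--         zz[2] ^ ((a[2] ^ a[3]) & (b[2] ^ b[3])) ^ ((a[0] ^ a[1]) & (b[0] ^ b[1])) ^ (a[3] & b[3]) ^ (a[0] & b[0]),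
--         zz[3] ^ ((a[0] ^ a[1]) & (b[0] ^ b[1])) ^ (a[3] & b[3]) ^ (a[2] & b[2]) ^ (a[1] & b[1]),
--     ]
--     return [a, b, d, t]
-- ===== Notes on version B (the rewrite author's own statement) =====
-- stated objective: simpler
-- what changed: Replaces the 70-gate simulate-then-uncompute circuit by direct algebraic evaluation: a and b are plain copies of x and y, d is returned as fifteen zeros (the mirrored second half un-computes every ancilla), and each t[i] is one closed-form XOR of AND terms obtained by collapsing the gate chain.
import Mathlib
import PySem

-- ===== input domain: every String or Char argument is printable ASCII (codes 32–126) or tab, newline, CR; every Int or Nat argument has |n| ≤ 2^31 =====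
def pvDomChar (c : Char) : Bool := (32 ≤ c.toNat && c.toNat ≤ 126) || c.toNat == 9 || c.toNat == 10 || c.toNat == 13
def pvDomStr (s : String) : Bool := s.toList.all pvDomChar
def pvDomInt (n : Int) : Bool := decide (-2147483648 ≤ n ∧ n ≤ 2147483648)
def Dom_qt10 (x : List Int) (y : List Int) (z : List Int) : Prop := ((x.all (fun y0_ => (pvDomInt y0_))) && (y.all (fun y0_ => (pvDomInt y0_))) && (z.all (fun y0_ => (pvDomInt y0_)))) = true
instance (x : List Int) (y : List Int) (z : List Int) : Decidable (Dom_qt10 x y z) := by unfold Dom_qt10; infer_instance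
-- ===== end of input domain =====

-- B replaces the simulate-then-uncompute gate chain by a direct algebraic evaluation:
-- d is fifteen zeros by the mirror symmetry and each t[i] is one closed-form XOR of AND terms (objective: simpler).

-- ===== PORT A =====
-- the `for i in range(4)` copy loop is unrolled (fixed bound 4); x[i] → pyGetD
-- (Python raises IndexError on a too-short list; Pre_qt10 excludes exactly those inputs)
def qt10 (x : List Int) (y : List Int) (z : List Int) : List (List Int) :=
  let a0 := PySem.List.pyGetD x 0 0
  let a1 := PySem.List.pyGetD x 1 0
  let a2 := PySem.List.pyGetD x 2 0
  let a3 := PySem.List.pyGetD x 3 0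
  let b0 := PySem.List.pyGetD y 0 0
  let b1 := PySem.List.pyGetD y 1 0
  let b2 := PySem.List.pyGetD y 2 0
  let b3 := PySem.List.pyGetD y 3 0
  let t0 := PySem.List.pyGetD z 0 0
  let t1 := PySem.List.pyGetD z 1 0
  let t2 := PySem.List.pyGetD z 2 0
  let t3 := PySem.List.pyGetD z 3 0
  -- d = [0]*15; each Python reassignment is a shadowing let, gates in source order
  let d0 : Int := 0
  let d1 : Int := 0
  let d2 : Int := 0
  let d3 : Int := 0
  let d4 : Int := 0
  let d5 : Int := 0
  let d6 : Int := 0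
  let d7 : Int := 0
  let d8 : Int := 0
  let d9 : Int := 0
  let d10 : Int := 0
  let d11 : Int := 0
  let d12 : Int := 0
  let d13 : Int := 0
  let d14 : Int := 0
  let cx := fun (p q : Int) => PySem.Int.bxor p q
  let ccx := fun (p q r : Int) => PySem.Int.bxor (PySem.Int.band p q) r
  let t2 := cx t3 t2
  let t0 := cx t2 t0
  let t0 := cx t1 t0
  -- mul2
  let d2 := cx a1 d2
  let d2 := cx a3 d2
  let d3 := cx b1 d3
  let d3 := cx b3 d3
  let d4 := cx a2 d4
  let d4 := cx a3 d4
  let d5 := cx b2 d5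
  let d5 := cx b3 d5
  let d6 := cx a0 d6
  let d6 := cx a2 d6
  let d7 := cx b0 d7
  let d7 := cx b2 d7
  let d0 := cx d6 d0
  let d0 := cx d2 d0
  let d1 := cx d7 d1
  let d1 := cx d3 d1
  let d8 := cx a0 d8
  let d8 := cx a1 d8
  let d9 := cx b0 d9
  let d9 := cx b1 d9
  let t0 := ccx d0 d1 t0
  let t1 := ccx d2 d3 t1
  let t2 := ccx d4 d5 t2
  let t3 := ccx d8 d9 t3
  let d10 := ccx d6 d7 d10
  let d11 := ccx a3 b3 d11
  let d12 := ccx a2 b2 d12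
  let d13 := ccx a1 b1 d13
  let d14 := ccx a0 b0 d14
  let t0 := cx t1 t0
  let t0 := cx t2 t0
  let t0 := cx d11 t0
  let t1 := cx d10 t1
  let t1 := cx d11 t1
  let t1 := cx d12 t1
  let t2 := cx t3 t2
  let t2 := cx d11 t2
  let t2 := cx d14 t2
  let t3 := cx d11 t3
  let t3 := cx d12 t3
  let t3 := cx d13 t3
  let d14 := ccx a0 b0 d14
  let d13 := ccx a1 b1 d13
  let d12 := ccx a2 b2 d12
  let d11 := ccx a3 b3 d11
  let d10 := ccx d6 d7 d10
  let d9 := cx b0 d9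
  let d9 := cx b1 d9
  let d8 := cx a0 d8
  let d8 := cx a1 d8
  let d1 := cx d7 d1
  let d1 := cx d3 d1
  let d0 := cx d6 d0
  let d0 := cx d2 d0
  let d7 := cx b0 d7
  let d7 := cx b2 d7
  let d6 := cx a0 d6
  let d6 := cx a2 d6
  let d5 := cx b2 d5
  let d5 := cx b3 d5
  let d4 := cx a2 d4
  let d4 := cx a3 d4
  let d3 := cx b1 d3
  let d3 := cx b3 d3
  let d2 := cx a1 d2
  let d2 := cx a3 d2
  [[a0, a1, a2, a3], [b0, b1, b2, b3],
   [d0, d1, d2, d3, d4, d5, d6, d7, d8, d9, d10, d11, d12, d13, d14],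
   [t0, t1, t2, t3]]

-- ===== PORT B =====
-- direct closed-form evaluation (from Source B); x[i] → pyGetD, same IndexError domain as A
def qt10_alt (x : List Int) (y : List Int) (z : List Int) : List (List Int) :=
  let a0 := PySem.List.pyGetD x 0 0
  let a1 := PySem.List.pyGetD x 1 0
  let a2 := PySem.List.pyGetD x 2 0
  let a3 := PySem.List.pyGetD x 3 0
  let b0 := PySem.List.pyGetD y 0 0
  let b1 := PySem.List.pyGetD y 1 0
  let b2 := PySem.List.pyGetD y 2 0
  let b3 := PySem.List.pyGetD y 3 0
  let z0 := PySem.List.pyGetD z 0 0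
  let z1 := PySem.List.pyGetD z 1 0
  let z2 := PySem.List.pyGetD z 2 0
  let z3 := PySem.List.pyGetD z 3 0
  let X := fun (p q : Int) => PySem.Int.bxor p q
  let A := fun (p q : Int) => PySem.Int.band p q
  let ea := X (X (X a0 a1) a2) a3
  let eb := X (X (X b0 b1) b2) b3
  let t0 := X (X (X (X z0 (A ea eb)) (A (X a1 a3) (X b1 b3))) (A (X a2 a3) (X b2 b3))) (A a3 b3)
  let t1 := X (X (X (X z1 (A (X a1 a3) (X b1 b3))) (A (X a0 a2) (X b0 b2))) (A a3 b3)) (A a2 b2)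
  let t2 := X (X (X (X z2 (A (X a2 a3) (X b2 b3))) (A (X a0 a1) (X b0 b1))) (A a3 b3)) (A a0 b0)
  let t3 := X (X (X (X z3 (A (X a0 a1) (X b0 b1))) (A a3 b3)) (A a2 b2)) (A a1 b1)
  [[a0, a1, a2, a3], [b0, b1, b2, b3],
   [0, 0, 0, 0, 0, 0, 0, 0, 0, 0, 0, 0, 0, 0, 0],
   [t0, t1, t2, t3]]

-- ===== PRECONDITION & SPEC =====
-- Pre_qt10 = exactly the inputs where Python A returns (it indexes x[i], y[i], z[i] for i = 0..3
-- and raises IndexError when any of the three lists is shorter than 4)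
def Pre_qt10 (x : List Int) (y : List Int) (z : List Int) : Prop :=
  4 ≤ x.length ∧ 4 ≤ y.length ∧ 4 ≤ z.length
instance (x : List Int) (y : List Int) (z : List Int) : Decidable (Pre_qt10 x y z) := by unfold Pre_qt10; infer_instance
def pvWitness_qt10 : List Int × List Int × List Int := ([1, 0, 1, 1], [0, 1, 1, 0], [1, 1, 0, 1])

def Spec_qt10 (x : List Int) (y : List Int) (z : List Int) (out : List (List Int)) : Prop := out = qt10_alt x y z
instance (x : List Int) (y : List Int) (z : List Int) (out : List (List Int)) : Decidable (Spec_qt10 x y z out) := by unfold Spec_qt10; infer_instance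

-- ===== CLAIM (what is proved, stated in full; the proofs are below) =====
def Claim_equal_qt10 : Prop := ∀ (x : List Int) (y : List Int) (z : List Int), Dom_qt10 x y z → Pre_qt10 x y z → Spec_qt10 x y z (qt10 x y z)

-- ===== LEMMAS AND PROOFS =====
-- encode an Int as (sign, magnitude bits): pvEnc false m = m, pvEnc true m = -(m+1);
-- on this encoding bxor acts componentwise, which gives associativity from Nat.xor_assoc.
def pvEnc (s : Bool) (m : Nat) : Int := if s then -(m + 1 : Nat) else m

theorem pvEnc_surj (a : Int) : ∃ s m, a = pvEnc s m := by
  rcases a with m | m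
  · exact ⟨false, m, rfl⟩
  · exact ⟨true, m, by simp [pvEnc, Int.negSucc_eq]⟩

theorem pvBxor_enc (s t : Bool) (m n : Nat) :
    PySem.Int.bxor (pvEnc s m) (pvEnc t n) = pvEnc (s ^^ t) (m ^^^ n) := by
  cases s <;> cases t <;> simp [pvEnc, PySem.Int.bxor] <;> omega

theorem pvBxor_assoc (a b c : Int) :
    PySem.Int.bxor (PySem.Int.bxor a b) c = PySem.Int.bxor a (PySem.Int.bxor b c) := by
  obtain ⟨s, m, rfl⟩ := pvEnc_surj a
  obtain ⟨t, n, rfl⟩ := pvEnc_surj b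
  obtain ⟨u, k, rfl⟩ := pvEnc_surj c
  rw [pvBxor_enc, pvBxor_enc, pvBxor_enc, pvBxor_enc, Bool.xor_assoc, Nat.xor_assoc]

theorem pvBxor_left_comm (a b c : Int) :
    PySem.Int.bxor a (PySem.Int.bxor b c) = PySem.Int.bxor b (PySem.Int.bxor a c) := by
  rw [← pvBxor_assoc, PySem.Int.bxor_comm a b, pvBxor_assoc]

theorem pvZero_bxor (a : Int) : PySem.Int.bxor 0 a = a := by
  rw [PySem.Int.bxor_comm, PySem.Int.bxor_zero]

theorem pvBxor_cancel (a b : Int) : PySem.Int.bxor a (PySem.Int.bxor a b) = b := by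
  rw [← pvBxor_assoc, PySem.Int.bxor_self, pvZero_bxor]

-- ===== VERDICT (by name: the statement is the Claim_ definition above) =====
theorem qt10_spec : Claim_equal_qt10 := by
  intro x y z _ _
  unfold Spec_qt10 qt10 qt10_alt
  simp only [PySem.Int.bxor_zero]
  simp [pvBxor_assoc, PySem.Int.bxor_comm, pvBxor_left_comm, pvBxor_cancel,
        PySem.Int.bxor_self, pvZero_bxor]
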